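-- pv_equiv track=rewrite | github.com/MrBrantCode/unitest_baseline | mut_generate/mist_train_cf/cf_59503/solution.py | find_bottleneck
-- ===== SOURCE A (Python) =====
-- def find_bottleneck(lst):
--     bottlenecks = []  # List to hold all bottleneck elements
--     for i in range(len(lst) - 1):
--         sum_left = sum(lst[:i])  # Sum of elements on the left
--         prod_right = 1  # Product of non-zero elements on the right
--         # Calculate product of non-zero elements on the right
--         for j in range(i + 1, len(lst)):
--             if lst[j] != 0:
--                 prod_right *= lst[j]
--         # Check if current element is a bottleneck
--         if sum_left == prod_right:
--             bottlenecks.append(lst[i])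
--     # Return the minimum bottleneck if any, otherwise return -1
--     if not bottlenecks:
--         return -1
--     else:
--         return min(bottlenecks)
-- ===== SOURCE B (Python) =====
-- def find_bottleneck(lst):
--     n = len(lst)
--     # suffix non-zero products: suf[i] = product of non-zero elements of lst[i:]
--     suf = [1] * (n + 1)
--     for i in range(n - 1, -1, -1):
--         suf[i] = suf[i + 1] * (lst[i] if lst[i] != 0 else 1)
--     best = None
--     s = 0  # running sum of lst[:i]
--     for i in range(n - 1):
--         if s == suf[i + 1] and (best is None or lst[i] < best):
--             best = lst[i]
--         s += lst[i]
--     return -1 if best is None else best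
-- ===== Notes on version B (the rewrite author's own statement) =====
-- stated objective: faster
-- what changed: Replaces A's per-index recomputation of the left sum and the right non-zero product (a full re-scan for every i, plus a final min over a collected list) with one backward pass building suffix non-zero products and one forward pass carrying a running prefix sum and running minimum.
import Mathlib
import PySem

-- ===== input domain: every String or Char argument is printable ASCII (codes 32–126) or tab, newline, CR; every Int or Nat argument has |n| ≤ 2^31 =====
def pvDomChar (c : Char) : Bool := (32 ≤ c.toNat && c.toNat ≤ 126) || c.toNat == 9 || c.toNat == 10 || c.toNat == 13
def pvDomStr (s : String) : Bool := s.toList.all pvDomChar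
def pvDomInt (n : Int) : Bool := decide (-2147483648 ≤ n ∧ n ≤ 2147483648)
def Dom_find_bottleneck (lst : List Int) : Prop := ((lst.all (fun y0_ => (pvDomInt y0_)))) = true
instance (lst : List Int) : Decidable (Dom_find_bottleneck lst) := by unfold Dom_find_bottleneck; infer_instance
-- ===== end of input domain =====

-- B replaces A's quadratic per-index re-scan (left sum and right non-zero product recomputed
-- for every i) by one backward pass of suffix non-zero products and one forward pass keeping a
-- running prefix sum and running minimum: O(n) instead of O(n^2).

-- ===== PORT A =====
def find_bottleneck (lst : List Int) : Int :=
  -- for i in range(len(lst)-1): sum_left = sum(lst[:i]); prod_right over non-zero lst[j], j>i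
  let bottlenecks : List Int :=
    (PySem.List.pyRange 0 ((lst.length : Int) - 1) 1).foldl (fun bs i =>
      let sum_left := (PySem.List.slice lst none (some i)).sum
      let prod_right := (PySem.List.pyRange (i + 1) ((lst.length : Int)) 1).foldl
        (fun p j => if PySem.List.pyGetD lst j 0 ≠ 0 then p * PySem.List.pyGetD lst j 0 else p) 1
      if sum_left = prod_right then bs ++ [PySem.List.pyGetD lst i 0] else bs) []
  match PySem.List.min? bottlenecks (fun y => y) with
  | none => -1
  | some m => m

-- ===== PORT B =====
-- suf[i] = product of non-zero elements of lst[i:], built back to front (Source B's backward loop,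
-- written as the structural recursion over the list; result list = [suf[0], …, suf[n]])
def pvSufProds : List Int → List Int
  | [] => [1]
  | x :: xs =>
    let s := pvSufProds xs
    (s.headD 1 * (if x ≠ 0 then x else 1)) :: s

-- Source B's forward loop: i ranges over 0..n-2, so the last element is never a candidate;
-- `suf` is the list [suf[i+1], …, suf[n]], `s` the running sum of lst[:i], `best` the running min
def pvBLoop : List Int → List Int → Int → Option Int → Option Int
  | [], _, _, best => best
  | [_], _, _, best => best
  | x :: y :: rest, suf, s, best =>
    let best' :=
      if s = suf.headD 1 then
        match best with
        | none => some x
        | some b => if x < b then some x else best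
      else best
    pvBLoop (y :: rest) suf.tail (s + x) best'

def find_bottleneck_alt (lst : List Int) : Int :=
  match pvBLoop lst (pvSufProds lst).tail 0 none with
  | none => -1
  | some b => b

-- ===== PRECONDITION & SPEC =====
def Spec_find_bottleneck (lst : List Int) (out : Int) : Prop := out = find_bottleneck_alt lst
instance (lst : List Int) (out : Int) : Decidable (Spec_find_bottleneck lst out) := by unfold Spec_find_bottleneck; infer_instance

-- ===== CLAIM (what is proved, stated in full; the proofs are below) =====
def Claim_equal_find_bottleneck : Prop := ∀ (lst : List Int), Dom_find_bottleneck lst → Spec_find_bottleneck lst (find_bottleneck lst)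

-- ===== LEMMAS AND PROOFS =====

theorem pvBLoop_cons2 (x y : Int) (rest suf : List Int) (s : Int) (best : Option Int) :
    pvBLoop (x :: y :: rest) suf s best =
      pvBLoop (y :: rest) suf.tail (s + x)
        (if s = suf.headD 1 then
          (match best with | none => some x | some b => if x < b then some x else best)
         else best) := rfl

-- product of the non-zero elements
def pvP (xs : List Int) : Int := (xs.filter (fun v => v ≠ 0)).prod

theorem pvP_cons (x : Int) (xs : List Int) :
    pvP (x :: xs) = (if x ≠ 0 then x else 1) * pvP xs := by
  by_cases h : x = 0 <;> simp [pvP, h]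

-- A's inner product loop computes c * pvP
theorem pv_foldl_prod (xs : List Int) (c : Int) :
    xs.foldl (fun p v => if v ≠ 0 then p * v else p) c = c * pvP xs := by
  induction xs generalizing c with
  | nil => simp [pvP]
  | cons x xs ih =>
    rw [List.foldl_cons]
    by_cases h : x = 0
    · rw [if_neg (by simp [h]), ih, pvP_cons, if_neg (by simp [h]), one_mul]
    · rw [if_pos h, ih, pvP_cons, if_pos h, mul_assoc]

theorem pvSufProds_headD (xs : List Int) : (pvSufProds xs).headD 1 = pvP xs := by
  induction xs with
  | nil => simp [pvSufProds, pvP]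
  | cons x xs ih =>
    show (pvSufProds xs).headD 1 * (if x ≠ 0 then x else 1) = pvP (x :: xs)
    rw [ih, pvP_cons, mul_comm]

theorem pvSufProds_cons_tail (x : Int) (xs : List Int) :
    (pvSufProds (x :: xs)).tail = pvSufProds xs := by
  simp [pvSufProds]

-- the candidate (bottleneck) values, relative to the prefix sum s
def pvCands (s : Int) : List Int → List Int
  | [] => []
  | [_] => []
  | x :: y :: rest =>
    (if s = pvP (y :: rest) then [x] else []) ++ pvCands (s + x) (y :: rest)

theorem pvCands_cons2 (s x y : Int) (rest : List Int) :
    pvCands s (x :: y :: rest) =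
      (if s = pvP (y :: rest) then [x] else []) ++ pvCands (s + x) (y :: rest) := rfl

-- one step of B's running minimum
def pvStep (b : Option Int) (x : Int) : Option Int :=
  match b with
  | none => some x
  | some m => if x < m then some x else some m

-- B's loop is the running minimum of the candidates
theorem pvBLoop_eq (u : List Int) :
    ∀ (s : Int) (best : Option Int),
      pvBLoop u (pvSufProds u).tail s best = (pvCands s u).foldl pvStep best := by
  induction u with
  | nil => intro s best; simp [pvBLoop, pvCands]
  | cons x xs ih =>
    cases xs with
    | nil => intro s best; simp [pvBLoop, pvCands]
    | cons y rest =>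
      intro s best
      rw [pvSufProds_cons_tail, pvBLoop_cons2, pvSufProds_headD, ih, pvCands_cons2]
      by_cases h : s = pvP (y :: rest)
      · rw [if_pos h, if_pos h]
        simp only [List.singleton_append, List.foldl_cons]
        congr 1
        cases best <;> simp [pvStep]
      · rw [if_neg h, if_neg h, List.nil_append]

-- running minimum from a seed is foldl min
theorem pv_foldl_step_some (t : List Int) :
    ∀ (m : Int), t.foldl pvStep (some m) = some (t.foldl min m) := by
  induction t with
  | nil => intro m; rfl
  | cons x t ih =>
    intro m
    have hx : pvStep (some m) x = some (min m x) := by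
      simp only [pvStep]
      by_cases h : x < m
      · rw [if_pos h, min_eq_right (le_of_lt h)]
      · rw [if_neg h, min_eq_left (by omega)]
    rw [List.foldl_cons, hx, ih]
    rfl

-- A's bottleneck-collecting loop equals pvCands, generalized over a prefix
theorem pvA_loop_eq (lst : List Int) :
    ∀ (u pre : List Int) (bs : List Int), lst = pre ++ u →
      (PySem.List.pyRange ((pre.length : Int)) ((lst.length : Int) - 1) 1).foldl (fun bs i =>
        let sum_left := (PySem.List.slice lst none (some i)).sum
        let prod_right := (PySem.List.pyRange (i + 1) ((lst.length : Int)) 1).foldl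
          (fun p j => if PySem.List.pyGetD lst j 0 ≠ 0 then p * PySem.List.pyGetD lst j 0 else p) 1
        if sum_left = prod_right then bs ++ [PySem.List.pyGetD lst i 0] else bs) bs
      = bs ++ pvCands pre.sum u := by
  intro u
  induction u with
  | nil =>
    intro pre bs hl
    have : ((lst.length : Int) - 1) ≤ (pre.length : Int) := by
      subst hl; simp
    rw [PySem.List.pyRange_one_eq_nil this]
    simp [pvCands]
  | cons x xs ih =>
    cases xs with
    | nil =>
      intro pre bs hl
      have hlen : (lst.length : Int) - 1 = (pre.length : Int) := by
        subst hl; simp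
      rw [hlen, PySem.List.pyRange_one_eq_nil le_rfl]
      show bs = bs ++ pvCands pre.sum [x]
      simp [pvCands]
    | cons y rest =>
      intro pre bs hl
      have hlen : lst.length = pre.length + (rest.length + 2) := by
        subst hl; simp
      have hlt : (pre.length : Int) < (lst.length : Int) - 1 := by
        rw [hlen]; push_cast; omega
      rw [PySem.List.pyRange_one_cons hlt, List.foldl_cons]
      -- evaluate the body at i = pre.length
      have hslice : PySem.List.slice lst none (some ((pre.length : Int))) = pre := by
        rw [PySem.List.slice_to_natCast]
        subst hl; simp
      have hdrop : lst.drop (pre.length + 1) = y :: rest := by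
        subst hl
        simp [List.drop_append]
      have hprod : (PySem.List.pyRange ((pre.length : Int) + 1) ((lst.length : Int)) 1).foldl
          (fun p j => if PySem.List.pyGetD lst j 0 ≠ 0 then p * PySem.List.pyGetD lst j 0 else p) 1
          = pvP (y :: rest) := by
        have hp := PySem.List.foldl_pyRange_pyGetD' lst 0
          (fun p v => if v ≠ 0 then p * v else p) 1 (a := (pre.length : Int) + 1) (by omega)
        beta_reduce at hp
        rw [hp, show ((pre.length : Int) + 1).toNat = pre.length + 1 by omega, hdrop,
          pv_foldl_prod, one_mul]
      have hget : PySem.List.pyGetD lst ((pre.length : Int)) 0 = x := by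
        rw [PySem.List.pyGetD_natCast]
        subst hl
        simp [List.getD]
      simp only [hslice, hprod, hget]
      have hrec := ih (pre ++ [x]) (if pre.sum = pvP (y :: rest) then bs ++ [x] else bs)
        (by simp [hl])
      simp only [List.length_append, List.length_cons, List.length_nil, List.sum_append,
        List.sum_cons, List.sum_nil] at hrec
      push_cast at hrec
      rw [show (pre.length : Int) + 1 = (pre.length : Int) + (0 + 1) by ring] at hrec
      by_cases hc : pre.sum = pvP (y :: rest)
      · rw [if_pos hc]
        rw [if_pos hc] at hrec
        rw [show ((pre.length : Int) + (0 + 1)) = (pre.length : Int) + 1 by ring] at hrec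
        rw [hrec]
        simp [pvCands, if_pos hc]
      · rw [if_neg hc]
        rw [if_neg hc] at hrec
        rw [show ((pre.length : Int) + (0 + 1)) = (pre.length : Int) + 1 by ring] at hrec
        rw [hrec]
        simp [pvCands, if_neg hc]

-- ===== VERDICT (by name: the statement is the Claim_ definition above) =====
theorem find_bottleneck_spec : Claim_equal_find_bottleneck := by
  intro lst _
  unfold Spec_find_bottleneck find_bottleneck find_bottleneck_alt
  dsimp only
  have hA := pvA_loop_eq lst lst [] [] (by simp)
  simp only [List.length_nil, Nat.cast_zero, List.sum_nil, List.nil_append] at hA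
  rw [hA, pvBLoop_eq lst 0 none]
  cases h : pvCands 0 lst with
  | nil => simp [PySem.List.min?]
  | cons c cs =>
    rw [List.foldl_cons, show pvStep none c = some c from rfl, pv_foldl_step_some,
      PySem.List.min?_id_cons]
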